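-- pv_equiv track=rewrite | github.com/phatt-23/SPR | p3/10160/main2.py | nbit_set
-- ===== SOURCE A (Python) =====
-- def nbit_set(seq, n, seq_len):
--     ones = 0
--     for i in range(seq_len):
--         if seq >> i & 1 == 1:
--             ones += 1
--         if ones > n:
--             return False
--     return True
-- ===== SOURCE B (Python) =====
-- def nbit_set(seq, n, seq_len):
--     # Bits of seq above seq.bit_length() are all 0 (seq >= 0) or all 1 (seq < 0):
--     # count that tail arithmetically, then count the low bits with Brian
--     # Kernighan's x &= x-1 loop (one iteration per set bit), with early exit.
--     if seq_len <= 0: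
--         return True
--     width = min(seq_len, seq.bit_length())
--     x = seq % (1 << width)          # the low `width` bits, non-negative
--     ones = seq_len - width if seq < 0 else 0   # the all-ones tail
--     if ones > n:
--         return False
--     while x:
--         x &= x - 1                  # clear the lowest set bit
--         ones += 1
--         if ones > n:
--             return False
--     return ones <= n
-- ===== Notes on version B (the rewrite author's own statement) =====
-- stated objective: faster
-- what changed: Replaces the per-position scan over all seq_len indices (seq >> i & 1) by counting the constant tail above seq.bit_length() arithmetically and running Brian Kernighan's x &= x-1 loop (one iteration per set bit, with early exit) on the low bits.
import Mathlib
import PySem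

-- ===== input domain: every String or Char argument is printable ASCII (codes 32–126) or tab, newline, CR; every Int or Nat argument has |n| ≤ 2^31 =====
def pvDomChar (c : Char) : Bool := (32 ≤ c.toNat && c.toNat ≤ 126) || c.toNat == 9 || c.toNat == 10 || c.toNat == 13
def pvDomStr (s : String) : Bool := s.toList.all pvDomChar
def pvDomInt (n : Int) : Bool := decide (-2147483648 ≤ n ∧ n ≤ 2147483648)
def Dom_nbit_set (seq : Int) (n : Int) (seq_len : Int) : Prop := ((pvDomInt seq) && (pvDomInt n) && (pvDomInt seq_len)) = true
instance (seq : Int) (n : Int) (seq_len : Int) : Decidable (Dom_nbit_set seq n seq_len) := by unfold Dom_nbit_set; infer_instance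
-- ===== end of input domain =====

-- B replaces A's per-position index scan by counting the constant bit-tail above bit_length arithmetically plus Kernighan's x &= x-1 loop on the low bits (measured faster).

-- ===== PORT A =====
-- `for i in range(seq_len): ...` with early `return False`: fuel = iterations left,
-- i = current index, ones = the running count
def loopA (seq : Int) (n : Int) : Nat → Int → Int → Bool
  | 0, _, _ => true
  | fuel + 1, i, ones =>
    let ones := if PySem.Int.band (seq >>> i.toNat) 1 == 1 then ones + 1 else ones
    if ones > n then false
    else loopA seq n fuel (i + 1) ones

def nbit_set (seq : Int) (n : Int) (seq_len : Int) : Bool :=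
  loopA seq n seq_len.toNat 0 0

-- ===== PORT B =====
-- `while x: x &= x-1; ones += 1; if ones > n: return False` then `return ones <= n`
-- (x is the non-negative masked value, so it is carried as a Nat)
def kernLoop (x : Nat) (ones : Int) (n : Int) : Bool :=
  if h : x = 0 then decide (ones ≤ n)
  else
    let x' := x &&& (x - 1)
    let ones' := ones + 1
    if ones' > n then false else kernLoop x' ones' n
termination_by x
decreasing_by exact Nat.lt_of_le_of_lt Nat.and_le_right (Nat.pred_lt h)

def nbit_set_alt (seq : Int) (n : Int) (seq_len : Int) : Bool :=
  if seq_len ≤ 0 then true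
  else
    let width : Int := min seq_len ((PySem.Int.bitLength seq : Nat) : Int)
    let x : Nat := (PySem.Int.mod seq ((1 : Int) <<< width.toNat)).toNat
    let ones : Int := if seq < 0 then seq_len - width else 0
    if ones > n then false
    else kernLoop x ones n

-- ===== PRECONDITION & SPEC =====
def Spec_nbit_set (seq : Int) (n : Int) (seq_len : Int) (out : Bool) : Prop := out = nbit_set_alt seq n seq_len
instance (seq : Int) (n : Int) (seq_len : Int) (out : Bool) : Decidable (Spec_nbit_set seq n seq_len out) := by unfold Spec_nbit_set; infer_instance

-- ===== CLAIM (what is proved, stated in full; the proofs are below) =====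
def Claim_equal_nbit_set : Prop := ∀ (seq : Int) (n : Int) (seq_len : Int), Dom_nbit_set seq n seq_len → Spec_nbit_set seq n seq_len (nbit_set seq n seq_len)

-- ===== LEMMAS AND PROOFS =====

-- number of set bits among the low M bits of an integer, low bit first
def bit1 (s : Int) : Nat := if s % 2 = 1 then 1 else 0

def cntI (s : Int) : Nat → Nat
  | 0 => 0
  | M + 1 => bit1 s + cntI (s / 2) M

-- popcount of a natural number
def bc (x : Nat) : Nat :=
  if x = 0 then 0 else x % 2 + bc (x / 2)

theorem bc_eq (x : Nat) : bc x = x % 2 + bc (x / 2) := by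
  by_cases h : x = 0
  · subst h; simp [bc]
  · rw [bc]; simp [h]

theorem bc_zero : bc 0 = 0 := by simp [bc]

-- ----- Kernighan's lemma -----
theorem land_pred_odd (k : Nat) : (2 * k + 1) &&& (2 * k) = 2 * k := by
  apply Nat.eq_of_testBit_eq
  intro i
  rw [Nat.testBit_and]
  cases i with
  | zero =>
    have e1 : (2 * k + 1) % 2 = 1 := by omega
    have e2 : (2 * k) % 2 = 0 := by omega
    simp [Nat.testBit_zero, e1, e2]
  | succ j =>
    rw [Nat.testBit_succ, Nat.testBit_succ]
    have e1 : (2 * k + 1) / 2 = k := by omega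
    have e2 : (2 * k) / 2 = k := by omega
    rw [e1, e2, Bool.and_self]

theorem land_pred_even (k : Nat) (hk : k ≠ 0) :
    (2 * k) &&& (2 * k - 1) = 2 * (k &&& (k - 1)) := by
  apply Nat.eq_of_testBit_eq
  intro i
  rw [Nat.testBit_and]
  cases i with
  | zero =>
    have e1 : (2 * k) % 2 = 0 := by omega
    have e2 : (2 * (k &&& (k - 1))) % 2 = 0 := by omega
    simp [Nat.testBit_zero, e1, e2]
  | succ j =>
    rw [Nat.testBit_succ, Nat.testBit_succ, Nat.testBit_succ]
    have e1 : (2 * k) / 2 = k := by omega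
    have e2 : (2 * k - 1) / 2 = k - 1 := by omega
    have e3 : (2 * (k &&& (k - 1))) / 2 = k &&& (k - 1) := by omega
    rw [e1, e2, e3, Nat.testBit_and]

theorem bc_land_pred (x : Nat) (hx : x ≠ 0) : bc (x &&& (x - 1)) + 1 = bc x := by
  induction x using Nat.strong_induction_on with
  | _ x ih =>
    rcases Nat.even_or_odd x with ⟨k, hk⟩ | ⟨k, hk⟩
    · -- x = 2k, k ≠ 0
      have hk2 : x = 2 * k := by omega
      have hk0 : k ≠ 0 := by omega
      rw [hk2, land_pred_even k hk0]
      have h1 : bc (2 * (k &&& (k - 1))) = bc (k &&& (k - 1)) := by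
        rw [bc_eq (2 * (k &&& (k - 1)))]
        have : (2 * (k &&& (k - 1))) % 2 = 0 := by omega
        have h2 : (2 * (k &&& (k - 1))) / 2 = k &&& (k - 1) := by omega
        rw [this, h2]; omega
      have h3 : bc (2 * k) = bc k := by
        rw [bc_eq (2 * k)]
        have : (2 * k) % 2 = 0 := by omega
        have h4 : (2 * k) / 2 = k := by omega
        rw [this, h4]; omega
      rw [h1, h3]
      exact ih k (by omega) hk0
    · -- x = 2k+1
      have hk2 : x = 2 * k + 1 := by omega
      rw [hk2]
      have h0 : 2 * k + 1 - 1 = 2 * k := by omega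
      rw [h0, land_pred_odd k]
      rw [bc_eq (2 * k), bc_eq (2 * k + 1)]
      have e1 : (2 * k) % 2 = 0 := by omega
      have e2 : (2 * k) / 2 = k := by omega
      have e3 : (2 * k + 1) % 2 = 1 := by omega
      have e4 : (2 * k + 1) / 2 = k := by omega
      rw [e1, e2, e3, e4]
      omega

-- ----- characterisation of B's loop -----
theorem kernLoop_char (n : Int) (x : Nat) : ∀ (o : Int), o ≤ n →
    kernLoop x o n = decide (o + (bc x : Int) ≤ n) := by
  induction x using Nat.strong_induction_on with
  | _ x ih =>
    intro o ho
    by_cases hx : x = 0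
    · subst hx; rw [kernLoop]; simp [bc_zero]
    · rw [kernLoop]
      simp only [hx, dite_false]
      have hb : bc (x &&& (x - 1)) + 1 = bc x := bc_land_pred x hx
      have hbi : ((bc (x &&& (x - 1)) : Int)) + 1 = (bc x : Int) := by exact_mod_cast hb
      by_cases hgt : o + 1 > n
      · have h1 : (1 : Int) ≤ (bc x : Int) := by
          exact_mod_cast Nat.one_le_iff_ne_zero.mpr (by omega)
        have h2 : ¬ (o + (bc x : Int) ≤ n) := by omega
        simp [hgt, h2]
      · have hlt : x &&& (x - 1) < x := Nat.lt_of_le_of_lt Nat.and_le_right (Nat.pred_lt hx)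
        rw [if_neg hgt, ih _ hlt (o + 1) (by omega)]
        rw [decide_eq_decide]
        omega

-- ----- characterisation of A's loop -----
theorem bandBit (s : Int) : (PySem.Int.band s 1 == 1) = decide (s % 2 = 1) := by
  rw [PySem.Int.band_one, PySem.Int.mod_eq_emod_of_pos (by norm_num)]
  rfl

theorem shift_succ (s : Int) (i : Nat) : s >>> (i + 1) = (s >>> i) / 2 := by
  rw [Int.shiftRight_eq_div_pow, Int.shiftRight_eq_div_pow]
  push_cast
  rw [Int.ediv_ediv_of_nonneg (by positivity : (0 : Int) ≤ (2 : Int) ^ i), pow_succ]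

theorem loopA_char (n seq : Int) : ∀ (M i : Nat) (o : Int), o ≤ n →
    loopA seq n M ((i : Nat) : Int) o = decide (o + (cntI (seq >>> i) M : Int) ≤ n) := by
  intro M
  induction M with
  | zero => intro i o ho; simp [loopA, cntI, ho]
  | succ M ih =>
    intro i o ho
    rw [loopA]
    simp only [bandBit]
    have htn : (((i : Nat) : Int)).toNat = i := by simp
    rw [htn]
    have hcnt : cntI (seq >>> i) (M + 1) = bit1 (seq >>> i) + cntI ((seq >>> i) / 2) M := rfl
    have hb : (if decide ((seq >>> i) % 2 = 1) = true then o + 1 else o) = o + (bit1 (seq >>> i) : Int) := by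
      simp only [bit1]
      split_ifs with h <;> simp_all
    rw [hb]
    by_cases hgt : o + (bit1 (seq >>> i) : Int) > n
    · rw [if_pos hgt]
      have : ¬ (o + (cntI (seq >>> i) (M + 1) : Int) ≤ n) := by
        rw [hcnt]; push_cast; omega
      simp [this]
    · rw [if_neg hgt]
      have hi1 : ((i : Nat) : Int) + 1 = (((i + 1 : Nat)) : Int) := by push_cast; ring
      rw [hi1, ih (i + 1) _ (by omega), shift_succ, hcnt]
      rw [decide_eq_decide]
      push_cast
      omega

theorem loopA_neg (n seq : Int) (M : Nat) (i o : Int) (ho : 0 ≤ o) (hn : n < 0) :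
    loopA seq n (M + 1) i o = false := by
  rw [loopA]
  split_ifs with h1 h2 h2 <;> first | rfl | (exfalso; omega)

-- ----- bridge: popcount of the masked value = A's bit count -----
theorem emod_pow_succ (seq : Int) (M : Nat) :
    seq % ((2 : Int) ^ (M + 1)) = seq % 2 + 2 * ((seq / 2) % (2 : Int) ^ M) := by
  have hK : (0 : Int) < 2 ^ M := by positivity
  have hq : seq / 2 = (seq / 2) % (2 : Int) ^ M + 2 ^ M * ((seq / 2) / 2 ^ M) := by
    rw [Int.emod_def]; ring
  have hseq : seq = 2 * (seq / 2) + seq % 2 := by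
    rw [Int.emod_def]; ring
  have hexp : seq = (seq % 2 + 2 * ((seq / 2) % (2 : Int) ^ M)) + (2 : Int) ^ (M + 1) * ((seq / 2) / 2 ^ M) := by
    conv_lhs => rw [hseq]
    conv_lhs => rw [hq]
    ring
  conv_lhs => rw [hexp]
  rw [Int.add_mul_emod_self_left]
  apply Int.emod_eq_of_lt
  · have h1 : 0 ≤ seq % 2 := Int.emod_nonneg _ (by norm_num)
    have h2 : 0 ≤ (seq / 2) % (2 : Int) ^ M := Int.emod_nonneg _ (by omega)
    omega
  · have h1 : seq % 2 < 2 := Int.emod_lt_of_pos _ (by norm_num)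
    have h2 : (seq / 2) % (2 : Int) ^ M < 2 ^ M := Int.emod_lt_of_pos _ hK
    have : (2 : Int) ^ (M + 1) = 2 * 2 ^ M := by ring
    omega

theorem bridge (M : Nat) : ∀ (seq : Int), bc ((seq % ((2 : Int) ^ M)).toNat) = cntI seq M := by
  induction M with
  | zero => intro seq; simp [cntI, bc_zero]
  | succ M ih =>
    intro seq
    have hd := emod_pow_succ seq M
    have hr0 : 0 ≤ seq % 2 := Int.emod_nonneg _ (by norm_num)
    have hr1 : seq % 2 < 2 := Int.emod_lt_of_pos _ (by norm_num)
    have hw0 : 0 ≤ (seq / 2) % (2 : Int) ^ M := Int.emod_nonneg _ (by positivity)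
    set v : Nat := (seq % ((2 : Int) ^ (M + 1))).toNat with hv
    set r : Nat := (seq % 2).toNat with hr
    set w : Nat := ((seq / 2) % (2 : Int) ^ M).toNat with hw
    have hvrw : v = r + 2 * w := by
      have : (0:Int) ≤ seq % ((2:Int)^(M+1)) := Int.emod_nonneg _ (by positivity)
      omega
    rw [bc_eq v]
    have h1 : v % 2 = r := by omega
    have h2 : v / 2 = w := by omega
    rw [h1, h2, ih (seq / 2)]
    show r + cntI (seq / 2) M = cntI seq (M + 1)
    have : bit1 seq = r := by
      simp only [bit1]
      split_ifs with h <;> omega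
    simp [cntI, this]

-- ----- the bits above bitLength are a constant tail -----
theorem ediv_eq_neg_one {a b : Int} (hb : 0 < b) (h1 : -b ≤ a) (h2 : a < 0) : a / b = -1 := by
  have h3 := Int.ediv_add_emod a b
  have h4 := Int.emod_nonneg a (by omega : b ≠ 0)
  have h5 := Int.emod_lt_of_pos a hb
  rcases lt_trichotomy (a / b) (-1) with h | h | h
  · exfalso
    have hq2 : a / b ≤ -2 := by omega
    have : b * (a / b) ≤ b * (-2) := mul_le_mul_of_nonneg_left hq2 (by omega)
    omega
  · exact h
  · exfalso
    have hq2 : 0 ≤ a / b := by omega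
    have : 0 ≤ b * (a / b) := mul_nonneg (by omega) hq2
    omega

theorem shiftRight_big_neg (s : Int) (w : Nat) (hbl : PySem.Int.bitLength s ≤ w) (hs : s < 0) :
    s >>> w = -1 := by
  rw [Int.shiftRight_eq_div_pow]
  have h1 : s.natAbs < 2 ^ w :=
    lt_of_lt_of_le (PySem.Int.lt_two_pow_bitLength s) (Nat.pow_le_pow_right (by norm_num) hbl)
  have habs : (s.natAbs : Int) < (2 : Int) ^ w := by exact_mod_cast h1
  push_cast
  exact ediv_eq_neg_one (by positivity) (by omega) hs

theorem shiftRight_big_nonneg (s : Int) (w : Nat) (hbl : PySem.Int.bitLength s ≤ w) (hs : 0 ≤ s) :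
    s >>> w = 0 := by
  rw [Int.shiftRight_eq_div_pow]
  have h1 : s.natAbs < 2 ^ w :=
    lt_of_lt_of_le (PySem.Int.lt_two_pow_bitLength s) (Nat.pow_le_pow_right (by norm_num) hbl)
  have habs : (s.natAbs : Int) < (2 : Int) ^ w := by exact_mod_cast h1
  push_cast
  exact Int.ediv_eq_zero_of_lt hs (by omega)

theorem cntI_zero_left : ∀ (b : Nat), cntI 0 b = 0 := by
  intro b
  induction b with
  | zero => rfl
  | succ b ih => simp [cntI, bit1, ih]

theorem cntI_neg_one : ∀ (b : Nat), cntI (-1) b = b := by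
  intro b
  induction b with
  | zero => rfl
  | succ b ih =>
    have h1 : (-1 : Int) % 2 = 1 := by decide
    have h2 : (-1 : Int) / 2 = -1 := by decide
    simp [cntI, bit1, h1, h2, ih]
    omega

theorem shift_succ_left (s : Int) (a : Nat) : s >>> (a + 1) = (s / 2) >>> a := by
  rw [Int.shiftRight_eq_div_pow, Int.shiftRight_eq_div_pow]
  push_cast
  rw [Int.ediv_ediv_of_nonneg (by norm_num : (0 : Int) ≤ 2), pow_succ']

theorem cntI_split : ∀ (a : Nat) (s : Int) (b : Nat),
    cntI s (a + b) = cntI s a + cntI (s >>> a) b := by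
  intro a
  induction a with
  | zero =>
    intro s b
    have h0 : s >>> (0 : Nat) = s := by
      rw [Int.shiftRight_eq_div_pow]; simp
    simp [cntI, h0]
  | succ a ih =>
    intro s b
    have h1 : a + 1 + b = (a + b) + 1 := by omega
    rw [h1]
    show bit1 s + cntI (s / 2) (a + b) = cntI s (a + 1) + cntI (s >>> (a + 1)) b
    rw [ih (s / 2) b, shift_succ_left]
    show bit1 s + (cntI (s / 2) a + cntI ((s / 2) >>> a) b) =
      (bit1 s + cntI (s / 2) a) + cntI ((s / 2) >>> a) b
    omega

-- unfolds B's let-bindings once seq_len > 0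
theorem alt_unfold (seq n seq_len : Int) (h : ¬ seq_len ≤ 0) :
    nbit_set_alt seq n seq_len =
      (if (if seq < 0 then seq_len - min seq_len ((PySem.Int.bitLength seq : Nat) : Int) else 0) > n
       then false
       else kernLoop
         ((PySem.Int.mod seq ((1 : Int) <<< (min seq_len ((PySem.Int.bitLength seq : Nat) : Int)).toNat)).toNat)
         (if seq < 0 then seq_len - min seq_len ((PySem.Int.bitLength seq : Nat) : Int) else 0) n) := by
  unfold nbit_set_alt
  rw [if_neg h]

-- ===== VERDICT (by name: the statement is the Claim_ definition above) =====
theorem nbit_set_spec : Claim_equal_nbit_set := by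
  intro seq n seq_len _
  unfold Spec_nbit_set nbit_set
  by_cases hL : seq_len ≤ 0
  · have h0 : seq_len.toNat = 0 := by omega
    unfold nbit_set_alt
    rw [h0, if_pos hL]
    rfl
  · rw [alt_unfold seq n seq_len hL]
    have hLpos : 0 < seq_len := by omega
    have hw0 : (0 : Int) ≤ min seq_len ((PySem.Int.bitLength seq : Nat) : Int) := by
      have : (0 : Int) ≤ ((PySem.Int.bitLength seq : Nat) : Int) := by positivity
      omega
    have hwle : min seq_len ((PySem.Int.bitLength seq : Nat) : Int) ≤ seq_len := min_le_left _ _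
    -- Nat versions
    have hWM : (min seq_len ((PySem.Int.bitLength seq : Nat) : Int)).toNat ≤ seq_len.toNat := by omega
    -- abbreviations
    have hshl : (1 : Int) <<< (min seq_len ((PySem.Int.bitLength seq : Nat) : Int)).toNat =
        (2 : Int) ^ (min seq_len ((PySem.Int.bitLength seq : Nat) : Int)).toNat := by
      rw [Int.shiftLeft_eq]; ring
    have hmod : PySem.Int.mod seq ((1 : Int) <<< (min seq_len ((PySem.Int.bitLength seq : Nat) : Int)).toNat) =
        seq % ((2 : Int) ^ (min seq_len ((PySem.Int.bitLength seq : Nat) : Int)).toNat) := by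
      rw [hshl, PySem.Int.mod_eq_emod_of_pos (by positivity)]
    rw [hmod]
    generalize hM : seq_len.toNat = M at *
    generalize hW : (min seq_len ((PySem.Int.bitLength seq : Nat) : Int)).toNat = W at *
    -- the tail above W is all ones (seq < 0) or all zeros (0 ≤ seq)
    have htail : cntI (seq >>> W) (M - W) = if seq < 0 then M - W else 0 := by
      by_cases hble : ((PySem.Int.bitLength seq : Nat) : Int) ≤ seq_len
      · have hWbl : W = PySem.Int.bitLength seq := by omega
        by_cases hs : seq < 0
        · rw [if_pos hs, hWbl, shiftRight_big_neg seq _ le_rfl hs, cntI_neg_one]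
        · rw [if_neg hs, hWbl, shiftRight_big_nonneg seq _ le_rfl (by omega), cntI_zero_left]
      · have hWM2 : W = M := by omega
        rw [hWM2, Nat.sub_self]
        simp [cntI]
    have hsplit : cntI seq M = cntI seq W + cntI (seq >>> W) (M - W) := by
      conv_lhs => rw [show M = W + (M - W) from by omega]
      exact cntI_split W seq (M - W)
    have hones : (if seq < 0 then seq_len - min seq_len ((PySem.Int.bitLength seq : Nat) : Int) else 0) =
        (if seq < 0 then ((M - W : Nat) : Int) else 0) := by
      by_cases hs : seq < 0 <;> simp [hs] <;> omega
    rw [hones]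
    have hM1 : ∃ M' : Nat, M = M' + 1 := ⟨M - 1, by omega⟩
    obtain ⟨M', hM'⟩ := hM1
    by_cases hn : n < 0
    · rw [hM', loopA_neg n seq M' 0 0 le_rfl hn]
      rw [if_pos (by by_cases hs : seq < 0 <;> simp [hs] <;> omega)]
    · push Not at hn
      have hA : loopA seq n M 0 0 = decide ((cntI seq M : Int) ≤ n) := by
        have h := loopA_char n seq M 0 0 hn
        simpa using h
      rw [hA]
      by_cases hpre : (if seq < 0 then ((M - W : Nat) : Int) else 0) > n
      · rw [if_pos hpre]
        have : ¬ ((cntI seq M : Int) ≤ n) := by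
          rw [hsplit, htail]
          by_cases hs : seq < 0 <;> simp [hs] at hpre ⊢ <;> push_cast <;> omega
        simp [this]
      · rw [if_neg hpre, kernLoop_char n _ _ (by omega), bridge W seq]
        rw [decide_eq_decide, hsplit, htail]
        by_cases hs : seq < 0 <;> simp [hs] at hpre ⊢ <;> push_cast <;> omega
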